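-- pv_equiv track=rewrite | github.com/Lightning-AI/litdata | src/litdata/utilities/shuffle.py | _aggregate_shared_chunks_per_rank
-- ===== SOURCE A (Python) =====
-- from typing import Any, Dict, List, Tuple
--
-- def _aggregate_shared_chunks_per_rank(
--     shared_chunks: Dict[int, List[int]], num_workers: int
-- ) -> Dict[int, Dict[int, List[int]]]:
--     """Groups together shared chunks by rank.
--
--     The output is a dictionary mapping a chunk index to a dictionary that maps a rank to a list of workers.
--
--     """
--     aggregated_shared_chunks_per_rank: Dict[int, Dict[int, List[int]]] = {}
--     for chunk_index, workers_ids in shared_chunks.items():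
--         aggregated_shared_chunks_per_rank[chunk_index] = {}
--         for worker_idx in workers_ids:
--             if (worker_idx // num_workers) not in aggregated_shared_chunks_per_rank[chunk_index]:
--                 aggregated_shared_chunks_per_rank[chunk_index][worker_idx // num_workers] = []
--             aggregated_shared_chunks_per_rank[chunk_index][worker_idx // num_workers].append(worker_idx)
--     return aggregated_shared_chunks_per_rank
-- ===== SOURCE B (Python) =====
-- def _aggregate_shared_chunks_per_rank(shared_chunks, num_workers):
--     """Groups together shared chunks by rank: for each chunk, list the distinct
--     ranks in first-appearance order, then collect each rank's workers by a filter pass."""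
--     result = {}
--     for chunk_index, workers_ids in shared_chunks.items():
--         ranks = list(dict.fromkeys(w // num_workers for w in workers_ids))
--         result[chunk_index] = {
--             r: [w for w in workers_ids if w // num_workers == r] for r in ranks
--         }
--     return result
-- ===== Notes on version B (the rewrite author's own statement) =====
-- stated objective: alternative
-- what changed: Replaces A's single-pass grouping that mutates a dict of lists (membership test, empty-list insert, append) with a two-phase construction: dedup the rank keys in first-appearance order, then build each rank's worker list by a filter comprehension.
import Mathlib
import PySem

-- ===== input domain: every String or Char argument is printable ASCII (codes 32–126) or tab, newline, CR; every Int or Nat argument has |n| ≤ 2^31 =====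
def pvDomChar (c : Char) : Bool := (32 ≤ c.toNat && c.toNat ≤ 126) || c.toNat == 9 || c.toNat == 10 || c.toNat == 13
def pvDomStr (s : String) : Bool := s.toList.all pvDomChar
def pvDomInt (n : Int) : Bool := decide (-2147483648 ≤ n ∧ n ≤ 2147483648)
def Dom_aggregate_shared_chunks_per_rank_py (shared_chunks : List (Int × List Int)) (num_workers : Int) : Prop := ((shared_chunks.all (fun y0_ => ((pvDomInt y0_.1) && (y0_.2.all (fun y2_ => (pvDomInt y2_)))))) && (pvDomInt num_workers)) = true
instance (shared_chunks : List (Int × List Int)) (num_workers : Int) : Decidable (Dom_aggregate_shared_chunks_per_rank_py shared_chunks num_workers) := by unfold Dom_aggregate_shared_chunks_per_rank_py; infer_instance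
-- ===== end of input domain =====

-- B replaces A's single-pass dict-of-lists grouping (membership test / insert / append)
-- with a two-phase build: dedup the rank keys in first-appearance order, then one filter
-- pass per rank ("alternative": structurally different, similar cost).

-- ===== PORT A =====
-- nested dicts are PySem.Dict internally; the returned association lists are their .items
def aggregate_shared_chunks_per_rank_py (shared_chunks : List (Int × List Int)) (num_workers : Int) : List (Int × List (Int × List Int)) :=
  let agg : PySem.Dict Int (PySem.Dict Int (List Int)) :=
    shared_chunks.foldl (fun agg p =>
      let agg := agg.insert p.1 PySem.Dict.empty
      p.2.foldl (fun agg w =>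
        let r := PySem.Int.floordiv w num_workers
        let inner := agg.getD p.1 PySem.Dict.empty
        let inner := if inner.contains r then inner else inner.insert r ([] : List Int)
        let inner := inner.modify r [] (fun l => l ++ [w])
        agg.insert p.1 inner) agg) PySem.Dict.empty
  agg.items.map (fun q => (q.1, q.2.items))

-- ===== PORT B =====
def aggregate_shared_chunks_per_rank_py_alt (shared_chunks : List (Int × List Int)) (num_workers : Int) : List (Int × List (Int × List Int)) :=
  (shared_chunks.foldl (fun result p =>
      let ranks := PySem.List.dedup (p.2.map (fun w => PySem.Int.floordiv w num_workers))
      result.insert p.1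
        (ranks.map (fun r => (r, p.2.filter (fun w => PySem.Int.floordiv w num_workers == r)))))
    (PySem.Dict.empty : PySem.Dict Int (List (Int × List Int)))).items

-- ===== PRECONDITION & SPEC =====
-- Pre_ excludes exactly the inputs where Python A raises ZeroDivisionError:
-- num_workers = 0 with at least one nonempty worker list.
def Pre_aggregate_shared_chunks_per_rank_py (shared_chunks : List (Int × List Int)) (num_workers : Int) : Prop :=
  num_workers ≠ 0 ∨ ∀ p ∈ shared_chunks, p.2 = []
instance (shared_chunks : List (Int × List Int)) (num_workers : Int) : Decidable (Pre_aggregate_shared_chunks_per_rank_py shared_chunks num_workers) := by unfold Pre_aggregate_shared_chunks_per_rank_py; infer_instance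

def pvWitness_aggregate_shared_chunks_per_rank_py : (List (Int × List Int)) × Int := ([(0, [0, 1, 2, 3]), (5, [2, 3, 4])], 2)

def Spec_aggregate_shared_chunks_per_rank_py (shared_chunks : List (Int × List Int)) (num_workers : Int) (out : List (Int × List (Int × List Int))) : Prop := out = aggregate_shared_chunks_per_rank_py_alt shared_chunks num_workers
instance (shared_chunks : List (Int × List Int)) (num_workers : Int) (out : List (Int × List (Int × List Int))) : Decidable (Spec_aggregate_shared_chunks_per_rank_py shared_chunks num_workers out) := by unfold Spec_aggregate_shared_chunks_per_rank_py; infer_instance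

-- ===== CLAIM (what is proved, stated in full; the proofs are below) =====
def Claim_equal_aggregate_shared_chunks_per_rank_py : Prop := ∀ (shared_chunks : List (Int × List Int)) (num_workers : Int), Dom_aggregate_shared_chunks_per_rank_py shared_chunks num_workers → Pre_aggregate_shared_chunks_per_rank_py shared_chunks num_workers → Spec_aggregate_shared_chunks_per_rank_py shared_chunks num_workers (aggregate_shared_chunks_per_rank_py shared_chunks num_workers)

-- ===== LEMMAS AND PROOFS =====

theorem pv_step_eq_modify (d : PySem.Dict Int (List Int)) (r w : Int) :
    (if d.contains r then d else d.insert r ([] : List Int)).modify r [] (fun l => l ++ [w])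
      = d.modify r [] (fun l => l ++ [w]) := by
  by_cases h : d.contains r
  · simp [h]
  · rw [if_neg (by simp [h])]
    simp only [PySem.Dict.modify, PySem.Dict.getD_insert_self, PySem.Dict.insert_insert_self,
      PySem.Dict.getD_of_not_contains _ _ (by simpa using h)]

theorem pv_focus_aux (ws : List Int) (nw k : Int) (agg : PySem.Dict Int (PySem.Dict Int (List Int)))
    (v : PySem.Dict Int (List Int)) :
    ws.foldl (fun agg w =>
        agg.insert k ((agg.getD k PySem.Dict.empty).modify (PySem.Int.floordiv w nw) [] (fun l => l ++ [w])))
      (agg.insert k v)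
      = agg.insert k (ws.foldl (fun d w => d.modify (PySem.Int.floordiv w nw) [] (fun l => l ++ [w])) v) := by
  induction ws generalizing v with
  | nil => rfl
  | cons w ws ih =>
    rw [List.foldl_cons, List.foldl_cons, PySem.Dict.getD_insert_self, PySem.Dict.insert_insert_self]
    exact ih _

theorem pv_focus (ws : List Int) (nw k : Int) (agg : PySem.Dict Int (PySem.Dict Int (List Int)))
    (v : PySem.Dict Int (List Int)) :
    ws.foldl (fun agg w =>
        let r := PySem.Int.floordiv w nw
        let inner := agg.getD k PySem.Dict.empty
        let inner := if inner.contains r then inner else inner.insert r ([] : List Int)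
        let inner := inner.modify r [] (fun l => l ++ [w])
        agg.insert k inner) (agg.insert k v)
      = agg.insert k (ws.foldl (fun d w => d.modify (PySem.Int.floordiv w nw) [] (fun l => l ++ [w])) v) := by
  rw [PySem.List.foldl_congr_mem _ _
      (fun agg w => agg.insert k ((agg.getD k PySem.Dict.empty).modify (PySem.Int.floordiv w nw) [] (fun l => l ++ [w])))
      _ (fun acc x _ => by simp only [pv_step_eq_modify])]
  exact pv_focus_aux ws nw k agg v

theorem pv_inner_items (ws : List Int) (nw : Int) :
    (ws.foldl (fun d w => d.modify (PySem.Int.floordiv w nw) [] (fun l => l ++ [w]))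
        (PySem.Dict.empty : PySem.Dict Int (List Int))).items
      = (PySem.List.dedup (ws.map (fun w => PySem.Int.floordiv w nw))).map
          (fun r => (r, ws.filter (fun w => PySem.Int.floordiv w nw == r))) := by
  have hnd : (ws.foldl (fun d w => d.modify (PySem.Int.floordiv w nw) [] (fun l => l ++ [w]))
      (PySem.Dict.empty : PySem.Dict Int (List Int))).keys.Nodup :=
    PySem.Dict.nodup_keys_foldl_modify_key ws (fun w => PySem.Int.floordiv w nw) []
      (fun _ w => fun l => l ++ [w]) _ (by simp)
  rw [PySem.Dict.items_eq_map_keys _ hnd ([] : List Int)]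
  rw [PySem.Dict.keys_foldl_modify_key ws (fun w => PySem.Int.floordiv w nw) []
      (fun _ w => fun l => l ++ [w]) PySem.Dict.empty]
  have hkeys : PySem.Set.update (PySem.Dict.empty : PySem.Dict Int (List Int)).keys
      (ws.map (fun w => PySem.Int.floordiv w nw))
      = PySem.List.dedup (ws.map (fun w => PySem.Int.floordiv w nw)) := by
    simp [PySem.Set.update, PySem.Set.ofList_eq_foldl, PySem.Dict.keys_empty]
  rw [hkeys]
  apply List.map_congr_left
  intro r _
  congr 1
  have hfold : ws.foldl (fun d w => d.modify (PySem.Int.floordiv w nw) [] (fun l => l ++ [w]))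
      (PySem.Dict.empty : PySem.Dict Int (List Int))
      = (ws.map (fun w => (PySem.Int.floordiv w nw, w))).foldl
          (fun d p => d.modify p.1 [] (fun l => l ++ [p.2])) PySem.Dict.empty := by
    rw [List.foldl_map]
  rw [hfold, PySem.Dict.getD_foldl_modify_append]
  simp [List.filter_map, List.map_map, Function.comp_def]

theorem pv_map_items_insert (aggA : PySem.Dict Int (PySem.Dict Int (List Int)))
    (aggB : PySem.Dict Int (List (Int × List Int)))
    (h : aggA.items.map (fun q => (q.1, q.2.items)) = aggB.items)
    (k : Int) (vA : PySem.Dict Int (List Int)) (vB : List (Int × List Int)) (hv : vA.items = vB) :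
    (aggA.insert k vA).items.map (fun q => (q.1, q.2.items)) = (aggB.insert k vB).items := by
  have hkeys : aggB.keys = aggA.keys := by
    simp only [PySem.Dict.keys, ← h, List.map_map, Function.comp_def]
  have hc : aggB.contains k = aggA.contains k := by
    simp [PySem.Dict.contains_eq_decide_mem_keys, hkeys]
  rw [PySem.Dict.items_insert, PySem.Dict.items_insert, hc]
  by_cases hck : aggA.contains k
  · simp only [hck, if_true, ← h, List.map_map]
    apply List.map_congr_left
    intro q _
    by_cases hq : q.1 = k <;> simp [hq, hv]
  · simp [hck, ← h, hv]

theorem pv_outer (shared_chunks : List (Int × List Int)) (nw : Int)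
    (aggA : PySem.Dict Int (PySem.Dict Int (List Int)))
    (aggB : PySem.Dict Int (List (Int × List Int)))
    (h : aggA.items.map (fun q => (q.1, q.2.items)) = aggB.items) :
    (shared_chunks.foldl (fun agg p =>
        let agg := agg.insert p.1 PySem.Dict.empty
        p.2.foldl (fun agg w =>
          let r := PySem.Int.floordiv w nw
          let inner := agg.getD p.1 PySem.Dict.empty
          let inner := if inner.contains r then inner else inner.insert r ([] : List Int)
          let inner := inner.modify r [] (fun l => l ++ [w])
          agg.insert p.1 inner) agg) aggA).items.map (fun q => (q.1, q.2.items))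
      = (shared_chunks.foldl (fun result p =>
          result.insert p.1
            ((PySem.List.dedup (p.2.map (fun w => PySem.Int.floordiv w nw))).map
              (fun r => (r, p.2.filter (fun w => PySem.Int.floordiv w nw == r))))) aggB).items := by
  induction shared_chunks generalizing aggA aggB with
  | nil => exact h
  | cons p rest ih =>
    rw [List.foldl_cons, List.foldl_cons]
    rw [pv_focus p.2 nw p.1 aggA PySem.Dict.empty]
    exact ih _ _ (pv_map_items_insert _ _ h _ _ _ (pv_inner_items p.2 nw))

-- ===== VERDICT (by name: the statement is the Claim_ definition above) =====
theorem aggregate_shared_chunks_per_rank_py_spec : Claim_equal_aggregate_shared_chunks_per_rank_py := by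
  intro sc nw _ _
  unfold Spec_aggregate_shared_chunks_per_rank_py aggregate_shared_chunks_per_rank_py aggregate_shared_chunks_per_rank_py_alt
  exact pv_outer sc nw PySem.Dict.empty PySem.Dict.empty rfl
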